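-- pv_equiv track=rewrite | github.com/689photo/coding_test_python | 프로그래머스/2/132265. 롤케이크 자르기/롤케이크 자르기.py | solution
-- ===== SOURCE A (Python) =====
-- from collections import Counter
--
-- def solution(topping):
--     old = Counter(topping)
--     young = set()
--     answer = 0
--
--     for i in topping:
--         young.add(i)
--
--         if i in old:
--             old[i] -= 1
--             if old[i] == 0:
--                 del old[i]
--
--         if len(young) == len(old.keys()):
--             answer += 1
--
--     return answer
-- ===== SOURCE B (Python) =====
-- def solution(topping):
--     # suffix[k] = number of distinct toppings in topping[k:], built right-to-left
--     suffix = [0]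
--     seen = set()
--     for t in reversed(topping):
--         seen.add(t)
--         suffix.append(len(seen))
--     suffix.reverse()
--     answer = 0
--     left = set()
--     for t, s in zip(topping, suffix[1:]):
--         left.add(t)
--         if len(left) == s:
--             answer += 1
--     return answer
-- ===== Notes on version B (the rewrite author's own statement) =====
-- stated objective: faster
-- what changed: A maintains a Counter of the unseen suffix and decrements/deletes a dict entry per element; B precomputes a suffix-distinct array in one right-to-left set pass and then compares a growing prefix set against it in a second pass, with no per-element dict mutation.
import Mathlib
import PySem

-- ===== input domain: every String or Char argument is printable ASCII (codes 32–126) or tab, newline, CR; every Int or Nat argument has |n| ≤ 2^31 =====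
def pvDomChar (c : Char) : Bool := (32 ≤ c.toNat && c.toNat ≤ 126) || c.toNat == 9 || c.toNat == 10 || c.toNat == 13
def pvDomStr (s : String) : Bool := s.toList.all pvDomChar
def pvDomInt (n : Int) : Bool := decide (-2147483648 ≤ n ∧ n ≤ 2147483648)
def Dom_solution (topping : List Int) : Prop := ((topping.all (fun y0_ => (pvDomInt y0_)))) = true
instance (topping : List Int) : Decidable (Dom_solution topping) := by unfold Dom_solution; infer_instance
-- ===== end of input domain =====

-- B replaces A's per-element Counter decrement/delete with a precomputed suffix-distinct array plus a prefix-set pass (measured constant-factor faster).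

-- ===== PORT A =====
-- one loop step of A: add to `young`, decrement/delete in `old`, bump `answer` on equal variety
def solStepA (st : PySem.Dict Int Int × PySem.Set Int × Int) (i : Int) :
    PySem.Dict Int Int × PySem.Set Int × Int :=
  let young := PySem.Set.add st.2.1 i
  let old := st.1
  let old' :=
    if old.contains i then
      let d1 := old.insert i (old.getD i 0 - 1)   -- old[i] -= 1 (key present via the guard)
      if d1.getD i 0 = 0 then d1.erase i else d1  -- if old[i] == 0: del old[i]
    else old
  let answer := if young.length = old'.keys.length then st.2.2 + 1 else st.2.2
  (old', young, answer)

def solution (topping : List Int) : Int :=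
  (topping.foldl solStepA (PySem.Dict.counter topping, PySem.Set.empty, 0)).2.2

-- ===== PORT B =====
-- right-to-left pass: returns (set of elements seen, the suffix-distinct array [|distinct xs[k:]| for k], ending in 0)
def suffixBuild (xs : List Int) : PySem.Set Int × List Int :=
  match xs with
  | [] => (PySem.Set.empty, [0])
  | x :: t =>
    let p := suffixBuild t
    let seen := PySem.Set.add p.1 x
    (seen, ((seen.length : Int) :: p.2))

def solution_alt (topping : List Int) : Int :=
  let suffix := (suffixBuild topping).2
  ((topping.zip suffix.tail).foldl
    (fun (st : PySem.Set Int × Int) p =>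
      let left := PySem.Set.add st.1 p.1
      (left, if (left.length : Int) = p.2 then st.2 + 1 else st.2))
    (PySem.Set.empty, 0)).2

-- ===== PRECONDITION & SPEC =====
def Spec_solution (topping : List Int) (out : Int) : Prop := out = solution_alt topping
instance (topping : List Int) (out : Int) : Decidable (Spec_solution topping out) := by unfold Spec_solution; infer_instance

-- ===== CLAIM (what is proved, stated in full; the proofs are below) =====
def Claim_equal_solution : Prop := ∀ (topping : List Int), Dom_solution topping → Spec_solution topping (solution topping)

-- ===== LEMMAS AND PROOFS =====

-- number of distinct elements of a list
def dcount (r : List Int) : Nat := (PySem.Set.ofList r).length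

-- common specification: walking r with prefix set `pre`, count positions where
-- the extended prefix's variety equals the remaining suffix's variety
def specGo (pre : PySem.Set Int) (r : List Int) : Int :=
  match r with
  | [] => 0
  | x :: t =>
    (if (PySem.Set.add pre x).length = dcount t then 1 else 0) + specGo (PySem.Set.add pre x) t

-- ---- B side ----

def sufCounts (xs : List Int) : List Int :=
  match xs with
  | [] => [0]
  | x :: t => (dcount (x :: t) : Int) :: sufCounts t

theorem suffixBuild_fst (xs : List Int) :
    (suffixBuild xs).1.Nodup ∧ (∀ y, y ∈ (suffixBuild xs).1 ↔ y ∈ xs) := by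
  induction xs with
  | nil => simp [suffixBuild, PySem.Set.empty]
  | cons x t ih =>
    refine ⟨PySem.Set.nodup_add _ _ ih.1, ?_⟩
    intro y
    rw [show (suffixBuild (x :: t)).1 = PySem.Set.add (suffixBuild t).1 x from rfl]
    rw [PySem.Set.mem_add]
    simp [ih.2 y]
    tauto

theorem suffixBuild_fst_length (xs : List Int) : (suffixBuild xs).1.length = dcount xs := by
  have h := suffixBuild_fst xs
  have hperm : (suffixBuild xs).1.Perm (PySem.Set.ofList xs) := by
    refine (List.perm_ext_iff_of_nodup h.1 (PySem.Set.nodup_ofList xs)).mpr ?_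
    intro a; rw [h.2 a, PySem.Set.mem_ofList]
  exact hperm.length_eq

theorem suffixBuild_snd (xs : List Int) : (suffixBuild xs).2 = sufCounts xs := by
  induction xs with
  | nil => rfl
  | cons x t ih =>
    show ((((suffixBuild (x :: t)).1.length : Int)) :: (suffixBuild t).2) = _
    rw [ih, suffixBuild_fst_length]
    rfl

theorem zip_sufCounts_cons (x : Int) (t : List Int) :
    (x :: t).zip (sufCounts (x :: t)).tail = (x, (dcount t : Int)) :: t.zip (sufCounts t).tail := by
  cases t with
  | nil => rfl
  | cons y t' => rfl

theorem bFold (xs : List Int) (pre : PySem.Set Int) (a : Int) :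
    ((xs.zip (sufCounts xs).tail).foldl
      (fun (st : PySem.Set Int × Int) p =>
        let left := PySem.Set.add st.1 p.1
        (left, if (left.length : Int) = p.2 then st.2 + 1 else st.2))
      (pre, a)).2 = a + specGo pre xs := by
  induction xs generalizing pre a with
  | nil => simp [specGo]
  | cons x t ih =>
    rw [zip_sufCounts_cons]
    simp only [List.foldl_cons]
    rw [ih]
    simp only [specGo]
    by_cases h : (PySem.Set.add pre x).length = dcount t
    · simp [h]; omega
    · have h' : ¬ (((PySem.Set.add pre x).length : Int) = (dcount t : Int)) := by
        exact_mod_cast h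
      simp [h, h']

theorem solution_alt_eq_spec (topping : List Int) :
    solution_alt topping = specGo PySem.Set.empty topping := by
  show ((topping.zip (suffixBuild topping).2.tail).foldl _ (PySem.Set.empty, 0)).2 = _
  rw [suffixBuild_snd, bFold]
  omega

-- ---- A side: erase facts ----

theorem find?_filter_ne (l : List (Int × Int)) (x k : Int) (h : k ≠ x) :
    (l.filter (fun p => !(p.1 == x))).find? (fun p => p.1 == k)
      = l.find? (fun p => p.1 == k) := by
  induction l with
  | nil => rfl
  | cons p l ih =>
    by_cases hp : p.1 = x
    · have hxk : (x == k) = false := beq_eq_false_iff_ne.mpr (Ne.symm h)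
      simp [List.filter_cons, List.find?_cons, hp, hxk, ih]
    · by_cases hk : p.1 = k
      · simp [List.filter_cons, List.find?_cons, hp, hk, h]
      · simp [List.filter_cons, List.find?_cons, hp, hk, ih]

theorem get?_erase (d : PySem.Dict Int Int) (x k : Int) :
    (d.erase x).get? k = if k = x then none else d.get? k := by
  by_cases h : k = x
  · subst h
    simp only [PySem.Dict.erase, PySem.Dict.get?, if_pos rfl]
    rw [List.find?_eq_none.mpr]
    · rfl
    · intro p hp
      have := (List.mem_filter.mp hp).2
      simpa using this
  · simp only [PySem.Dict.erase, PySem.Dict.get?, if_neg h]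
    rw [find?_filter_ne _ _ _ h]

theorem getD_erase (d : PySem.Dict Int Int) (x k : Int) (v : Int) :
    (d.erase x).getD k v = if k = x then v else d.getD k v := by
  simp only [PySem.Dict.getD, get?_erase]
  split_ifs <;> rfl

theorem contains_erase (d : PySem.Dict Int Int) (x k : Int) :
    (d.erase x).contains k = if k = x then false else d.contains k := by
  rw [PySem.Dict.contains_eq_isSome_get?, PySem.Dict.contains_eq_isSome_get?, get?_erase]
  split_ifs <;> rfl

theorem nodup_keys_erase (d : PySem.Dict Int Int) (x : Int) (h : d.keys.Nodup) :
    (d.erase x).keys.Nodup := by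
  have hsub : (d.erase x).keys.Sublist d.keys :=
    List.Sublist.map _ List.filter_sublist
  exact h.sublist hsub

-- ---- A side: the loop invariant ----

def AInv (d : PySem.Dict Int Int) (r : List Int) : Prop :=
  (∀ k : Int, d.getD k 0 = (r.count k : Int)) ∧
  (∀ k : Int, d.contains k = true ↔ k ∈ r) ∧
  d.keys.Nodup

theorem keysLen_of_inv (d : PySem.Dict Int Int) (r : List Int) (h : AInv d r) :
    d.keys.length = dcount r := by
  have hperm : d.keys.Perm (PySem.Set.ofList r) := by
    refine (List.perm_ext_iff_of_nodup h.2.2 (PySem.Set.nodup_ofList r)).mpr ?_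
    intro a
    rw [PySem.Set.mem_ofList, ← h.2.1 a, PySem.Dict.contains_iff_mem_keys]
  exact hperm.length_eq

theorem aStep_inv (d : PySem.Dict Int Int) (x : Int) (r : List Int) (h : AInv d (x :: r)) :
    AInv (if d.contains x then
            (let d1 := d.insert x (d.getD x 0 - 1)
             if d1.getD x 0 = 0 then d1.erase x else d1)
          else d) r := by
  obtain ⟨hcnt, hmem, hnd⟩ := h
  have hx : d.contains x = true := (hmem x).mpr (List.mem_cons_self)
  rw [if_pos hx]
  have hdx : d.getD x 0 - 1 = (r.count x : Int) := by
    rw [hcnt x]; simp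
  have hd1 : ∀ k : Int, (d.insert x (d.getD x 0 - 1)).getD k 0 = (r.count k : Int) := by
    intro k
    rw [PySem.Dict.getD_insert]
    by_cases hk : k = x
    · subst hk; simp [hdx]
    · rw [if_neg hk, hcnt k]
      have hxk : ¬ x = k := fun e => hk e.symm
      simp [hxk]
  have hc1 : ∀ k : Int, (d.insert x (d.getD x 0 - 1)).contains k = (k == x || d.contains k) :=
    fun k => PySem.Dict.contains_insert _ _ _ _
  have hn1 : (d.insert x (d.getD x 0 - 1)).keys.Nodup := PySem.Dict.nodup_keys_insert _ _ _ hnd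
  simp only []
  by_cases h0 : (d.insert x (d.getD x 0 - 1)).getD x 0 = 0
  · rw [if_pos h0]
    have hxr : x ∉ r := by
      have := hd1 x
      rw [h0] at this
      intro hxin
      have : r.count x ≠ 0 := by simpa [List.count_eq_zero] using hxin
      omega
    refine ⟨?_, ?_, nodup_keys_erase _ _ hn1⟩
    · intro k
      rw [getD_erase]
      by_cases hk : k = x
      · subst hk
        rw [if_pos rfl]
        have h0' : r.count k = 0 := List.count_eq_zero.mpr hxr
        simp [h0']
      · rw [if_neg hk, hd1 k]
    · intro k
      rw [contains_erase]
      by_cases hk : k = x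
      · subst hk; simp [hxr]
      · rw [if_neg hk, hc1 k]
        have hne : (k == x) = false := by simp [hk]
        rw [hne]
        simp only [Bool.false_or]
        rw [hmem k]
        simp [hk]
  · rw [if_neg h0]
    refine ⟨hd1, ?_, hn1⟩
    intro k
    rw [hc1 k]
    by_cases hk : k = x
    · subst hk
      simp only [beq_self_eq_true, Bool.true_or]
      refine ⟨fun _ => ?_, fun _ => trivial⟩
      have hc : r.count k ≠ 0 := by
        rw [hd1 k] at h0
        exact_mod_cast h0
      exact List.count_pos_iff.mp (Nat.pos_of_ne_zero hc)
    · have hne : (k == x) = false := by simp [hk]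
      rw [hne]
      simp only [Bool.false_or]
      rw [hmem k]
      simp [hk]

theorem aFold (r : List Int) (d : PySem.Dict Int Int) (young : PySem.Set Int) (a : Int)
    (h : AInv d r) :
    ((r.foldl solStepA (d, young, a)).2.2) = a + specGo young r := by
  induction r generalizing d young a with
  | nil => simp [specGo]
  | cons x t ih =>
    simp only [List.foldl_cons]
    have hinv := aStep_inv d x t h
    have hkey : (if d.contains x then
            (let d1 := d.insert x (d.getD x 0 - 1)
             if d1.getD x 0 = 0 then d1.erase x else d1)
          else d).keys.length = dcount t := keysLen_of_inv _ _ hinv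
    show ((t.foldl solStepA (solStepA (d, young, a) x)).2.2) = _
    rw [show solStepA (d, young, a) x =
        ((if d.contains x then
            (let d1 := d.insert x (d.getD x 0 - 1)
             if d1.getD x 0 = 0 then d1.erase x else d1)
          else d),
         PySem.Set.add young x,
         (if (PySem.Set.add young x).length = (if d.contains x then
            (let d1 := d.insert x (d.getD x 0 - 1)
             if d1.getD x 0 = 0 then d1.erase x else d1)
          else d).keys.length then a + 1 else a)) from rfl]
    rw [ih _ _ _ hinv]
    rw [hkey]
    simp only [specGo]
    by_cases hcond : (PySem.Set.add young x).length = dcount t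
    · simp [hcond]; omega
    · simp [hcond]

theorem counter_inv (topping : List Int) : AInv (PySem.Dict.counter topping) topping := by
  refine ⟨fun k => PySem.Dict.getD_counter topping k, fun k => ?_, PySem.Dict.nodup_keys_counter topping⟩
  rw [PySem.Dict.contains_counter]
  simp

-- ===== VERDICT (by name: the statement is the Claim_ definition above) =====
theorem solution_spec : Claim_equal_solution := by
  intro topping _
  show solution topping = solution_alt topping
  rw [solution_alt_eq_spec]
  show ((topping.foldl solStepA (PySem.Dict.counter topping, PySem.Set.empty, 0)).2.2) = _
  rw [aFold topping _ _ _ (counter_inv topping)]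
  omega
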